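-- pv_equiv track=rewrite | github.com/shloimy-dev/sites-scraper | scripts/get_all_product_data.py | best_product_link
-- ===== SOURCE A (Python) =====
-- def best_product_link(links: list[str], query: str) -> str | None:
--     if not links or not query:
--         return links[0] if links else None
--     q = query.lower()
--     for url in links:
--         if q in url.lower():
--             return url
--     for url in links:
--         for w in q.split():
--             if len(w) > 2 and w in url.lower():
--                 return url
--     return links[0]
-- ===== SOURCE B (Python) =====
-- def best_product_link(links: list[str], query: str) -> str | None:
--     if not links or not query:
--         return links[0] if links else None
--     q = query.lower()
--     words = [w for w in q.split() if len(w) > 2]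
--     cand = None
--     for url in links:
--         ul = url.lower()
--         if q in ul:
--             return url
--         if cand is None and any(w in ul for w in words):
--             cand = url
--     return cand if cand is not None else links[0]
-- ===== Notes on version B (the rewrite author's own statement) =====
-- stated objective: faster
-- what changed: Replaces A's two sequential scans of links with a single pass that returns immediately on a full-query match and keeps the first word-match url as a fallback candidate; the long-word list is split and filtered once up front instead of re-splitting the query inside the nested loop for every url.
import Mathlib
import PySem

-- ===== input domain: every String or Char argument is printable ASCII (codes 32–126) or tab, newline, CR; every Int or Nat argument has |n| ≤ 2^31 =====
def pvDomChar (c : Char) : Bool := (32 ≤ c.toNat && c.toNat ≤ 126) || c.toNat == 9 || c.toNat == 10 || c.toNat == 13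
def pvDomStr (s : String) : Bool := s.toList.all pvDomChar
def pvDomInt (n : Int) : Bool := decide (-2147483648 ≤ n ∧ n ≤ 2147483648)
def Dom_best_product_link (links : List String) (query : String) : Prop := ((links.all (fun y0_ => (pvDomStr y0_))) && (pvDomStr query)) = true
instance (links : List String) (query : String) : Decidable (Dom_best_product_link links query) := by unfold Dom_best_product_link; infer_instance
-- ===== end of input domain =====

-- B replaces A's two sequential scans of links by a single pass that returns on a full-query
-- match and keeps the first word-match url as a fallback candidate (alternative decomposition,
-- same asymptotic cost).


-- ===== PORT A =====
-- first loop: 'for url in links: if q in url.lower(): return url'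
def bplLoop1 (q : String) : List String → Option String
  | [] => none
  | url :: rest =>
    if PySem.Str.isIn q (PySem.Str.lower url) then some url else bplLoop1 q rest

-- second loop: 'for url in links: for w in q.split(): if len(w) > 2 and w in url.lower(): return url'
def bplLoop2 (q : String) : List String → Option String
  | [] => none
  | url :: rest =>
    if (PySem.Str.split₀ q).any
        (fun w => decide (2 < PySem.Str.len w) && PySem.Str.isIn w (PySem.Str.lower url)) then
      some url
    else bplLoop2 q rest

def best_product_link (links : List String) (query : String) : Option String :=
  if links = [] ∨ query = "" then links.head?
  else
    let q := PySem.Str.lower query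
    match bplLoop1 q links with
    | some u => some u
    | none =>
      match bplLoop2 q links with
      | some u => some u
      | none => links.head?

-- ===== PORT B =====
-- one pass: return on full-query match, remember the first word-match url as fallback
def bplAltLoop (q : String) (words : List String) (cand : Option String) :
    List String → Option String
  | [] => cand
  | url :: rest =>
    let ul := PySem.Str.lower url
    if PySem.Str.isIn q ul then some url
    else
      bplAltLoop q words
        (if cand.isNone && words.any (fun w => PySem.Str.isIn w ul) then some url else cand) rest

def best_product_link_alt (links : List String) (query : String) : Option String :=
  if links = [] ∨ query = "" then links.head?
  else
    let q := PySem.Str.lower query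
    let words := (PySem.Str.split₀ q).filter (fun w => decide (2 < PySem.Str.len w))
    match bplAltLoop q words none links with
    | some u => some u
    | none => links.head?

-- ===== PRECONDITION & SPEC =====
def Spec_best_product_link (links : List String) (query : String) (out : Option String) : Prop := out = best_product_link_alt links query
instance (links : List String) (query : String) (out : Option String) : Decidable (Spec_best_product_link links query out) := by unfold Spec_best_product_link; infer_instance

-- ===== CLAIM (what is proved, stated in full; the proofs are below) =====
def Claim_equal_best_product_link : Prop := ∀ (links : List String) (query : String), Dom_best_product_link links query → Spec_best_product_link links query (best_product_link links query)

-- ===== LEMMAS AND PROOFS =====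
theorem bplAltLoop_eq (q : String) (words : List String)
    (hw : words = (PySem.Str.split₀ q).filter (fun w => decide (2 < PySem.Str.len w)))
    (cand : Option String) (links : List String) :
    bplAltLoop q words cand links =
      match bplLoop1 q links with
      | some u => some u
      | none =>
        match cand with
        | some c => some c
        | none => bplLoop2 q links := by
  induction links generalizing cand with
  | nil => cases cand <;> simp only [bplAltLoop, bplLoop1, bplLoop2]
  | cons url rest ih =>
    simp only [bplAltLoop, bplLoop1, bplLoop2]
    cases hfull : PySem.Str.isIn q (PySem.Str.lower url) with
    | true => simp only [if_pos]
    | false =>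
      simp only [Bool.false_eq_true, if_false]
      rw [ih]
      cases cand with
      | some c =>
        simp only [Option.isNone_some, Bool.false_and]
        cases bplLoop1 q rest <;> simp
      | none =>
        simp only [Option.isNone_none, Bool.true_and, hw, List.any_filter]
        cases hword : (PySem.Str.split₀ q).any
            (fun w => decide (2 < PySem.Str.len w) && PySem.Str.isIn w (PySem.Str.lower url)) with
        | true => cases bplLoop1 q rest <;> simp
        | false => cases bplLoop1 q rest <;> simp

-- ===== VERDICT (by name: the statement is the Claim_ definition above) =====
theorem best_product_link_spec : Claim_equal_best_product_link := by
  intro links query _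
  unfold Spec_best_product_link best_product_link best_product_link_alt
  by_cases hg : links = [] ∨ query = ""
  · simp [hg]
  · simp only [hg, if_false]
    rw [bplAltLoop_eq _ _ rfl]
    cases h1 : bplLoop1 (PySem.Str.lower query) links with
    | some u => simp
    | none => cases h2 : bplLoop2 (PySem.Str.lower query) links <;> simp
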